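-- pv_equiv track=rewrite | github.com/Sanielia/DiamentBitMatura | ciagi_zadanie/1.py | longest_not_descending_coherent_subsequence
-- ===== SOURCE A (Python) =====
-- def longest_not_descending_coherent_subsequence(sequence: list[int]) -> list[int]:
--     start = 0
--     end = 0
--     current_start = 0
--     length = len(sequence)
--     if length < 2:
--         return sequence
--
--     last_number = sequence[0]
--
--     for i, number in enumerate(sequence):
--         if number >= last_number:
--             last_number = number
--             continue
--         last_number = number
--         if  end - start >= i - current_start:
--             current_start = i
--             continue
--         start = current_start
--         end = i
--         current_start = i
--
--     if end - start < length - current_start: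
--         start = current_start
--         end = length
--
--     return sequence[start:end]
-- ===== SOURCE B (Python) =====
-- def longest_not_descending_coherent_subsequence(sequence: list[int]) -> list[int]:
--     if len(sequence) < 2:
--         return sequence
--     n = len(sequence)
--     # run boundaries: 0, every descent index, n
--     bounds = [0] + [i for i, (p, x) in enumerate(zip(sequence, sequence[1:]), 1) if x < p] + [n]
--     best_start, best_end = 0, 0
--     for a, b in zip(bounds, bounds[1:]):
--         if b - a > best_end - best_start:
--             best_start, best_end = a, b
--     return sequence[best_start:best_end]
-- ===== Notes on version B (the rewrite author's own statement) =====
-- stated objective: alternative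
-- what changed: Replaces A's single stateful scan carrying (start, end, current_start, last_number) by a two-phase decomposition: first collect the run boundaries (0, each descent index, n), then scan adjacent boundary pairs keeping the first strictly-longest segment.
import Mathlib
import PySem

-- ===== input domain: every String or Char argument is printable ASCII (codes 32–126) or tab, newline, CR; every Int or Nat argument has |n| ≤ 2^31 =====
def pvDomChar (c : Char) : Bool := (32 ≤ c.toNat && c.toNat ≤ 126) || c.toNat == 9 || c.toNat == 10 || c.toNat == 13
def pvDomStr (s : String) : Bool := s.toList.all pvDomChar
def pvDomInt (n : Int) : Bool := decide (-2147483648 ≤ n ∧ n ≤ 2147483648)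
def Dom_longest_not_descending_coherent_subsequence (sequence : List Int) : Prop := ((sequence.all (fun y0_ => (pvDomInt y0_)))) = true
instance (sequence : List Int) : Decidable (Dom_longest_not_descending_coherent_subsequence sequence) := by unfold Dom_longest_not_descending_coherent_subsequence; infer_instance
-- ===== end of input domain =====

-- B replaces A's single stateful scan by two phases (collect run boundaries, then pick the
-- strictly-longest segment between adjacent boundaries): objective = alternative decomposition.


-- ===== PORT A =====
-- loop body of A's for-loop: state (start, end, current_start, last_number), element (i, number)
def pvStepA (st : Int × Int × Int × Int) (p : Int × Int) : Int × Int × Int × Int :=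
  if p.2 ≥ st.2.2.2 then (st.1, st.2.1, st.2.2.1, p.2)
  else if st.2.1 - st.1 ≥ p.1 - st.2.2.1 then (st.1, st.2.1, p.1, p.2)
  else (st.2.2.1, p.1, p.1, p.2)

def longest_not_descending_coherent_subsequence (sequence : List Int) : List Int :=
  if sequence.length < 2 then sequence
  else
    -- sequence[0]: the guard guarantees the list is nonempty, so headI is exact here
    let st := (PySem.List.enumerate sequence 0).foldl pvStepA (0, 0, 0, sequence.headI)
    let n : Int := sequence.length
    if st.2.1 - st.1 < n - st.2.2.1 then PySem.List.slice sequence (some st.2.2.1) (some n)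
    else PySem.List.slice sequence (some st.1) (some st.2.1)

-- ===== PORT B =====
-- the comprehension [i for i, (p, x) in enumerate(zip(sequence, sequence[1:]), 1) if x < p]
def pvDescents : Int → List (Int × Int) → List Int
  | _, [] => []
  | i, q :: rest => if q.2 < q.1 then i :: pvDescents (i + 1) rest else pvDescents (i + 1) rest

-- loop body of B's for-loop over adjacent boundary pairs
def pvStepB (best : Int × Int) (p : Int × Int) : Int × Int :=
  if p.2 - p.1 > best.2 - best.1 then (p.1, p.2) else best

def longest_not_descending_coherent_subsequence_alt (sequence : List Int) : List Int :=
  if sequence.length < 2 then sequence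
  else
    let n : Int := sequence.length
    let bounds := 0 :: (pvDescents 1 (sequence.zip sequence.tail) ++ [n])
    let best := (bounds.zip bounds.tail).foldl pvStepB (0, 0)
    PySem.List.slice sequence (some best.1) (some best.2)

-- ===== PRECONDITION & SPEC =====
def Spec_longest_not_descending_coherent_subsequence (sequence : List Int) (out : List Int) : Prop := out = longest_not_descending_coherent_subsequence_alt sequence
instance (sequence : List Int) (out : List Int) : Decidable (Spec_longest_not_descending_coherent_subsequence sequence out) := by unfold Spec_longest_not_descending_coherent_subsequence; infer_instance

-- ===== CLAIM (what is proved, stated in full; the proofs are below) =====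
def Claim_equal_longest_not_descending_coherent_subsequence : Prop := ∀ (sequence : List Int), Dom_longest_not_descending_coherent_subsequence sequence → Spec_longest_not_descending_coherent_subsequence sequence (longest_not_descending_coherent_subsequence sequence)

-- ===== LEMMAS AND PROOFS =====

-- the descent-closing step of A, stripped of the last_number component
def pvGStep (st : Int × Int × Int) (d : Int) : Int × Int × Int :=
  if st.2.1 - st.1 ≥ d - st.2.2 then (st.1, st.2.1, d) else (st.2.2, d, d)

-- A's fold over the enumerated suffix = the pvGStep fold over the descent indices, plus the last element
theorem foldA_char (xs : List Int) : ∀ (i : Int) (prev s e c : Int),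
    (PySem.List.enumerate xs i).foldl pvStepA (s, e, c, prev) =
      (let g := (pvDescents i ((prev :: xs).zip xs)).foldl pvGStep (s, e, c)
       (g.1, g.2.1, g.2.2, (prev :: xs).getLast (by simp))) := by
  induction xs with
  | nil => intro i prev s e c; simp [PySem.List.enumerate_nil, pvDescents]
  | cons x xs ih =>
    intro i prev s e c
    rw [PySem.List.enumerate_cons]
    simp only [List.foldl_cons, List.zip_cons_cons]
    by_cases hx' : x < prev
    · have hx : ¬ x ≥ prev := by omega
      rw [show pvDescents i ((prev, x) :: (x :: xs).zip xs)
            = i :: pvDescents (i + 1) ((x :: xs).zip xs) from by simp [pvDescents, hx']]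
      by_cases hk : e - s ≥ i - c
      · rw [show pvStepA (s, e, c, prev) (i, x) = (s, e, i, x) from by simp [pvStepA, hx, hk]]
        rw [ih]
        simp only [List.foldl_cons]
        rw [show pvGStep (s, e, c) i = (s, e, i) from by simp [pvGStep, hk]]
        simp [List.getLast_cons]
      · rw [show pvStepA (s, e, c, prev) (i, x) = (c, i, i, x) from by simp [pvStepA, hx, hk]]
        rw [ih]
        simp only [List.foldl_cons]
        rw [show pvGStep (s, e, c) i = (c, i, i) from by simp [pvGStep, hk]]
        simp [List.getLast_cons]
    · have hx : x ≥ prev := by omega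
      rw [show pvDescents i ((prev, x) :: (x :: xs).zip xs)
            = pvDescents (i + 1) ((x :: xs).zip xs) from by simp [pvDescents, hx']]
      rw [show pvStepA (s, e, c, prev) (i, x) = (s, e, c, x) from by simp [pvStepA, hx]]
      rw [ih]
      simp [List.getLast_cons]

-- B's fold over the pairs of c :: (D ++ [n]) = A's pvGStep fold over D followed by A's final fix-up
theorem foldB_char (D : List Int) : ∀ (s e c n : Int),
    ((c :: (D ++ [n])).zip (D ++ [n])).foldl pvStepB (s, e) =
      (let g := D.foldl pvGStep (s, e, c)
       if g.2.1 - g.1 < n - g.2.2 then (g.2.2, n) else (g.1, g.2.1)) := by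
  induction D with
  | nil =>
    intro s e c n
    simp only [List.nil_append, List.zip_cons_cons, List.zip_nil_right, List.foldl_cons,
      List.foldl_nil]
    by_cases h : e - s < n - c
    · rw [show pvStepB (s, e) (c, n) = (c, n) from by simp [pvStepB]; omega]
      rw [if_pos h]
    · rw [show pvStepB (s, e) (c, n) = (s, e) from by simp [pvStepB]; omega]
      rw [if_neg h]
  | cons d D ih =>
    intro s e c n
    simp only [List.cons_append, List.zip_cons_cons, List.foldl_cons]
    by_cases hk : e - s ≥ d - c
    · rw [show pvStepB (s, e) (c, d) = (s, e) from by simp [pvStepB]; omega, ih]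
      rw [show pvGStep (s, e, c) d = (s, e, d) from by simp [pvGStep, hk]]
    · rw [show pvStepB (s, e) (c, d) = (c, d) from by simp [pvStepB]; omega, ih]
      rw [show pvGStep (s, e, c) d = (c, d, d) from by simp [pvGStep, hk]]

theorem main_eq (sequence : List Int) :
    longest_not_descending_coherent_subsequence sequence =
      longest_not_descending_coherent_subsequence_alt sequence := by
  unfold longest_not_descending_coherent_subsequence longest_not_descending_coherent_subsequence_alt
  by_cases hlen : sequence.length < 2
  · rw [if_pos hlen, if_pos hlen]
  · rw [if_neg hlen, if_neg hlen]
    obtain ⟨x, xs, rfl⟩ : ∃ y ys, sequence = y :: ys := by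
      cases sequence with
      | nil => simp at hlen
      | cons y ys => exact ⟨y, ys, rfl⟩
    simp only [List.headI, PySem.List.enumerate_cons, List.foldl_cons, List.tail_cons, zero_add]
    rw [show pvStepA (0, 0, 0, x) (0, x) = (0, 0, 0, x) from by simp [pvStepA]]
    rw [foldA_char xs 1 x 0 0 0]
    rw [foldB_char (pvDescents 1 ((x :: xs).zip xs)) 0 0 0 ((x :: xs).length : Int)]
    simp only []
    set g := (pvDescents 1 ((x :: xs).zip xs)).foldl pvGStep (0, 0, 0) with hg
    by_cases h : g.2.1 - g.1 < ((x :: xs).length : Int) - g.2.2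
    · rw [if_pos h, if_pos h]
    · rw [if_neg h, if_neg h]

-- ===== VERDICT (by name: the statement is the Claim_ definition above) =====
theorem longest_not_descending_coherent_subsequence_spec : Claim_equal_longest_not_descending_coherent_subsequence := by
  intro sequence _
  unfold Spec_longest_not_descending_coherent_subsequence
  exact main_eq sequence
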